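-- pv_equiv track=rewrite | github.com/EagleEye-xdata/Course_Reg_Sys | models/db.py | _split_sql
-- ===== SOURCE A (Python) =====
-- def _split_sql(sql_content):
--     """
--     Split SQL content by semicolons, handling comments properly.
--     Does NOT handle DELIMITER — use _parse_delimiter_sql for that.
--     """
--     statements = []
--     current = ''
--
--     for line in sql_content.split('\n'):
--         stripped = line.strip()
--
--         # Skip pure comment lines (but keep them if part of a statement)
--         if stripped.startswith('--'):
--             continue
--
--         # Remove inline comments
--         if '--' in line:
--             line = line[:line.index('--')]
--
--         current += line + ' '
--
--         if ';' in line: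
--             # Split on all semicolons in the line
--             parts = current.split(';')
--             for part in parts[:-1]:
--                 stmt = part.strip()
--                 if stmt:
--                     statements.append(stmt)
--             current = parts[-1]
--
--     # Last remaining
--     if current.strip():
--         statements.append(current.strip())
--
--     return statements
-- ===== SOURCE B (Python) =====
-- def _split_sql(sql_content):
--     """
--     Split SQL content by semicolons, handling comments properly.
--     One cleaning pass over the lines, then a single global split on ';'.
--     """
--     cleaned = ''
--     for line in sql_content.split('\n'):
--         if line.strip().startswith('--'):
--             continue
--         if '--' in line:
--             line = line[:line.index('--')]
--         cleaned += line + ' '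
--     return [stmt for part in cleaned.split(';') if (stmt := part.strip())]
-- ===== Notes on version B (the rewrite author's own statement) =====
-- stated objective: simpler
-- what changed: B drops A's running statement accumulator with its per-line incremental semicolon splitting and carry-forward remainder, instead concatenating the comment-stripped lines in one cleaning pass and doing a single global semicolon split of the whole cleaned text followed by strip-and-filter.
import Mathlib
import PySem

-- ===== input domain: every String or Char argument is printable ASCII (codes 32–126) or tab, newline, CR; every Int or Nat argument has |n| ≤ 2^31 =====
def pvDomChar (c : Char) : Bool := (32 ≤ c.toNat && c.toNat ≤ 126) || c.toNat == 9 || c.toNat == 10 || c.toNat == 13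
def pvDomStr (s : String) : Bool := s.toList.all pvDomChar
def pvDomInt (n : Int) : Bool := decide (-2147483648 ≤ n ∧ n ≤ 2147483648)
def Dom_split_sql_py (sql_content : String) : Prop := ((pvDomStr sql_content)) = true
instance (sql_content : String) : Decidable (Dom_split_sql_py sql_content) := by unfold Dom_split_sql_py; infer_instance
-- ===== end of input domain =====

-- B replaces A's running 'current' accumulator (per-line incremental semicolon split with carry-forward
-- remainder) by one cleaning pass concatenating the comment-stripped lines and a single global split on ';'.

-- helpers shared by both ports (the identical Python lines "line.strip().startswith('--')" and
-- "line = line[:line.index('--')] if '--' in line")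
def pvSkipLine (line : List Char) : Bool :=
  PySem.Chars.startswith (PySem.Chars.strip line) ['-', '-']

def pvStripInline (line : List Char) : List Char :=
  if PySem.Chars.isIn ['-', '-'] line then
    PySem.Chars.slice line none (some (PySem.Chars.find line ['-', '-']))
  else line

-- ===== PORT A =====
-- one iteration of A's loop over the lines: state = (statements, current)
def pvStepA (st : List (List Char) × List Char) (line0 : List Char) :
    List (List Char) × List Char :=
  if pvSkipLine line0 then st
  else
    let line := pvStripInline line0
    let current := st.2 ++ (line ++ [' '])
    if PySem.Chars.isIn [';'] line then
      let parts := PySem.Chars.splitOn current [';']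
      ((PySem.List.slice parts none (some (-1))).foldl
          (fun acc part =>
            let stmt := PySem.Chars.strip part
            if stmt ≠ [] then acc ++ [stmt] else acc) st.1,
        PySem.List.pyGetD parts (-1) [])
    else (st.1, current)

def split_sql_py (sql_content : String) : List String :=
  let r := (PySem.Chars.splitOn sql_content.toList ['\n']).foldl pvStepA ([], [])
  (if PySem.Chars.strip r.2 ≠ [] then r.1 ++ [PySem.Chars.strip r.2] else r.1).map String.ofList

-- ===== PORT B =====
def split_sql_py_alt (sql_content : String) : List String :=
  let cleaned := (PySem.Chars.splitOn sql_content.toList ['\n']).foldl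
      (fun acc line0 =>
        if pvSkipLine line0 then acc else acc ++ (pvStripInline line0 ++ [' '])) []
  ((PySem.Chars.splitOn cleaned [';']).filterMap
      (fun part =>
        let stmt := PySem.Chars.strip part
        if stmt = [] then none else some stmt)).map String.ofList

-- ===== PRECONDITION & SPEC =====
def Spec_split_sql_py (sql_content : String) (out : List String) : Prop := out = split_sql_py_alt sql_content
instance (sql_content : String) (out : List String) : Decidable (Spec_split_sql_py sql_content out) := by unfold Spec_split_sql_py; infer_instance

-- ===== CLAIM (what is proved, stated in full; the proofs are below) =====
def Claim_equal_split_sql_py : Prop := ∀ (sql_content : String), Dom_split_sql_py sql_content → Spec_split_sql_py sql_content (split_sql_py sql_content)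

-- ===== LEMMAS AND PROOFS =====

-- structural reference model of splitting on ';' (proof helper only)
def pvSP (l : List Char) : List (List Char) :=
  match l with
  | [] => [[]]
  | a :: t => if a = ';' then [] :: pvSP t else (pvSP t).modifyHead (a :: ·)

theorem pvSP_ne_nil (l : List Char) : pvSP l ≠ [] := by
  induction l with
  | nil => simp [pvSP]
  | cons a t ih =>
    simp only [pvSP]
    split
    · simp
    · cases h : pvSP t with
      | nil => exact absurd h ih
      | cons x xs => simp

theorem pvGo_spec :
    ∀ (fuel : Nat) (l cur : List Char) (acc : List (List Char)), l.length < fuel →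
      PySem.Chars.splitOn.go [';'] fuel l cur acc
        = acc.reverse ++ (pvSP l).modifyHead (cur.reverse ++ ·) := by
  intro fuel
  induction fuel with
  | zero => intro l cur acc h; omega
  | succ f ih =>
    intro l cur acc h
    cases l with
    | nil => simp [PySem.Chars.splitOn.go, pvSP]
    | cons a t =>
      by_cases hc : a = ';'
      · subst hc
        have hpre : List.isPrefixOf [';'] (';' :: t) = true := by
          simp [List.isPrefixOf]
        rw [PySem.Chars.splitOn.go]
        simp only [hpre, if_true, List.length_cons] at *
        rw [show List.drop (List.length ([] : List Char) + 1) (';' :: t) = t from rfl]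
        rw [ih t [] (cur.reverse :: acc) (by omega)]
        simp only [pvSP, if_true, List.reverse_cons, List.reverse_nil, List.nil_append,
          List.modifyHead]
        cases hsp : pvSP t with
        | nil => exact absurd hsp (pvSP_ne_nil t)
        | cons x xs => simp
      · have hpre : List.isPrefixOf [';'] (a :: t) = false := by
          simp [List.isPrefixOf]
          intro h'; exact absurd h'.symm hc
        rw [PySem.Chars.splitOn.go]
        simp only [hpre, Bool.false_eq_true, if_false]
        rw [ih t (a :: cur) acc (by simp at h; omega)]
        simp only [pvSP, hc, if_false]
        cases hsp : pvSP t with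
        | nil => exact absurd hsp (pvSP_ne_nil t)
        | cons x xs => simp

theorem pvSplitOn_eq (l : List Char) :
    PySem.Chars.splitOn l [';'] = pvSP l := by
  rw [PySem.Chars.splitOn, pvGo_spec (l.length + 1) l [] [] (by omega)]
  cases hsp : pvSP l with
  | nil => exact absurd hsp (pvSP_ne_nil l)
  | cons x xs => simp

-- every chunk of pvSP is ';'-free
theorem pvSP_sepfree {l : List Char} {ch : List Char} (h : ch ∈ pvSP l) : ';' ∉ ch := by
  induction l generalizing ch with
  | nil => simp [pvSP] at h; simp [h]
  | cons a t ih =>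
    simp only [pvSP] at h
    split at h
    · rcases List.mem_cons.1 h with h1 | h1
      · simp [h1]
      · exact ih h1
    · rename_i ha
      cases hsp : pvSP t with
      | nil => exact absurd hsp (pvSP_ne_nil t)
      | cons x xs =>
        rw [hsp] at h
        simp only [List.modifyHead] at h
        rcases List.mem_cons.1 h with h1 | h1
        · subst h1
          intro hm
          rcases List.mem_cons.1 hm with h2 | h2
          · exact ha h2.symm
          · exact ih (by rw [hsp]; exact List.mem_cons_self) h2
        · exact ih (by rw [hsp]; exact List.mem_cons_of_mem x h1)

theorem pvSP_no_sep {l : List Char} (h : ';' ∉ l) : pvSP l = [l] := by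
  induction l with
  | nil => rfl
  | cons a t ih =>
    have ha : ¬ a = ';' := fun hh => h (hh ▸ List.mem_cons_self)
    have ht : ';' ∉ t := fun hh => h (List.mem_cons_of_mem a hh)
    simp [pvSP, ha, ih ht, List.modifyHead]

theorem pvSP_append_sepfree {a : List Char} (b : List Char) (h : ';' ∉ a) :
    pvSP (a ++ b) = (pvSP b).modifyHead (a ++ ·) := by
  induction a with
  | nil =>
    cases hsp : pvSP b with
    | nil => exact absurd hsp (pvSP_ne_nil b)
    | cons x xs => simp [hsp]
  | cons c t ih =>
    have hc : ¬ c = ';' := fun hh => h (hh ▸ List.mem_cons_self)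
    have ht : ';' ∉ t := fun hh => h (List.mem_cons_of_mem c hh)
    simp only [List.cons_append, pvSP, hc, if_false]
    rw [ih ht]
    cases hsp : pvSP b with
    | nil => exact absurd hsp (pvSP_ne_nil b)
    | cons x xs => simp [List.modifyHead_cons]

theorem pvSP_append (x y : List Char) :
    pvSP (x ++ y) = (pvSP x).dropLast ++ pvSP ((pvSP x).getLastD [] ++ y) := by
  induction x generalizing y with
  | nil => simp [pvSP]
  | cons a t ih =>
    by_cases ha : a = ';'
    · subst ha
      simp only [List.cons_append, pvSP, if_true]
      rw [ih y]
      cases hsp : pvSP t with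
      | nil => exact absurd hsp (pvSP_ne_nil t)
      | cons x xs => simp
    · simp only [List.cons_append, pvSP, ha, if_false]
      cases hsp : pvSP t with
      | nil => exact absurd hsp (pvSP_ne_nil t)
      | cons h tl =>
        rw [ih y, hsp, List.modifyHead_cons]
        cases tl with
        | nil =>
          -- pvSP t = [h]; h is ';'-free
          have hfree : ';' ∉ h := pvSP_sepfree (by rw [hsp]; exact List.mem_cons_self)
          have hfree' : ';' ∉ a :: h := by
            intro hm
            rcases List.mem_cons.1 hm with h1 | h1
            · exact ha h1.symm
            · exact hfree h1
          simp only [show ([h] : List (List Char)).dropLast = [] from rfl,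
            show ((a :: h) :: ([] : List (List Char))).dropLast = [] from rfl, List.nil_append,
            show ([h] : List (List Char)).getLastD [] = h from rfl,
            show ([a :: h] : List (List Char)).getLastD [] = a :: h from rfl]
          rw [pvSP_append_sepfree y hfree, pvSP_append_sepfree y hfree']
          cases hsp2 : pvSP y with
          | nil => exact absurd hsp2 (pvSP_ne_nil y)
          | cons z zs => simp [List.modifyHead_cons]
        | cons h2 tl2 =>
          simp [List.dropLast_cons₂, List.cons_append, List.modifyHead_cons]

-- A's inner part-collecting loop is an append of a filterMap
theorem pvEmit_foldl (l : List (List Char)) (acc : List (List Char)) :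
    l.foldl
      (fun acc part =>
        let stmt := PySem.Chars.strip part
        if stmt ≠ [] then acc ++ [stmt] else acc) acc
      = acc ++ l.filterMap
          (fun part =>
            let stmt := PySem.Chars.strip part
            if stmt = [] then none else some stmt) := by
  rw [show (fun (acc : List (List Char)) part =>
        let stmt := PySem.Chars.strip part
        if stmt ≠ [] then acc ++ [stmt] else acc)
      = (fun acc part => if PySem.Chars.strip part ≠ [] then acc ++ [PySem.Chars.strip part]
          else acc) from rfl,
    PySem.List.foldl_append_ite (fun part => PySem.Chars.strip part ≠ []) PySem.Chars.strip l acc]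
  congr 1
  induction l with
  | nil => rfl
  | cons a t ih =>
    by_cases h : PySem.Chars.strip a = []
    · rw [List.filter_cons_of_neg (by simp [h]), List.filterMap_cons_none (by simp [h])]
      exact ih
    · rw [List.filter_cons_of_pos (by simp [h]), List.filterMap_cons_some (b := PySem.Chars.strip a) (by simp [h]),
        List.map_cons, ih]

-- B's cleaning fold is a flatMap
def pvG (line0 : List Char) : List Char :=
  if pvSkipLine line0 then [] else pvStripInline line0 ++ [' ']

theorem pvClean_foldl (lines : List (List Char)) (acc : List Char) :
    lines.foldl
        (fun acc line0 =>
          if pvSkipLine line0 then acc else acc ++ (pvStripInline line0 ++ [' '])) acc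
      = acc ++ lines.flatMap pvG := by
  induction lines generalizing acc with
  | nil => simp
  | cons l t ih =>
    simp only [List.foldl_cons, List.flatMap_cons]
    by_cases h : pvSkipLine l
    · simp [h, ih, pvG]
    · simp [h, ih, pvG]

def pvEmitF (part : List Char) : Option (List Char) :=
  let stmt := PySem.Chars.strip part
  if stmt = [] then none else some stmt

-- main invariant: A's fold plus its final-flush block equals the emit of the global split
theorem pvMain (lines : List (List Char)) :
    ∀ (stmts : List (List Char)) (cur : List Char), ';' ∉ cur →
      (let r := lines.foldl pvStepA (stmts, cur)
       if PySem.Chars.strip r.2 ≠ [] then r.1 ++ [PySem.Chars.strip r.2] else r.1)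
        = stmts ++ (pvSP (cur ++ lines.flatMap pvG)).filterMap pvEmitF := by
  induction lines with
  | nil =>
    intro stmts cur hcur
    simp only [List.foldl_nil, List.flatMap_nil, List.append_nil]
    rw [pvSP_no_sep hcur]
    by_cases h : PySem.Chars.strip cur = []
    · simp [h, pvEmitF]
    · simp [h, pvEmitF]
  | cons line0 rest ih =>
    intro stmts cur hcur
    simp only [List.foldl_cons, List.flatMap_cons]
    by_cases hskip : pvSkipLine line0
    · simp only [pvStepA, hskip, if_true, pvG, List.nil_append]
      exact ih stmts cur hcur
    · simp only [pvStepA, hskip, Bool.false_eq_true, if_false, pvG]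
      by_cases hsemi : PySem.Chars.isIn [';'] (pvStripInline line0)
      · -- split branch
        simp only [hsemi, if_true]
        set current := cur ++ (pvStripInline line0 ++ [' ']) with hcurrent
        have hparts : PySem.Chars.splitOn current [';'] = pvSP current := pvSplitOn_eq current
        have hne : pvSP current ≠ [] := pvSP_ne_nil current
        have hlastfree : ';' ∉ (pvSP current).getLastD [] := by
          apply pvSP_sepfree
          rw [List.getLastD_eq_getLast?, List.getLast?_eq_some_getLast hne, Option.getD_some]
          exact List.getLast_mem hne
        rw [hparts, PySem.List.slice_to_neg_one, pvEmit_foldl,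
          PySem.List.pyGetD_neg_one _ [] hne]
        have hlast : (pvSP current).getLast hne = (pvSP current).getLastD [] := by
          rw [List.getLastD_eq_getLast?, List.getLast?_eq_some_getLast hne, Option.getD_some]
        rw [hlast]
        rw [ih _ _ hlastfree]
        rw [show cur ++ ((pvStripInline line0 ++ [' ']) ++ rest.flatMap pvG)
              = current ++ rest.flatMap pvG by simp [hcurrent]]
        rw [pvSP_append current (rest.flatMap pvG), List.filterMap_append, List.append_assoc]
        rfl
      · -- no semicolon: current stays ';'-free
        simp only [hsemi, Bool.false_eq_true, if_false]
        have hfree : ';' ∉ cur ++ (pvStripInline line0 ++ [' ']) := by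
          intro hm
          rcases List.mem_append.1 hm with h1 | h1
          · exact hcur h1
          · rcases List.mem_append.1 h1 with h2 | h2
            · exact hsemi ((PySem.Chars.isIn_iff_infix _ _).2 ((List.singleton_infix_iff _ _).2 h2))
            · simp at h2
        rw [ih stmts _ hfree, List.append_assoc]

-- ===== VERDICT (by name: the statement is the Claim_ definition above) =====
theorem split_sql_py_spec : Claim_equal_split_sql_py := by
  intro s _
  unfold Spec_split_sql_py split_sql_py split_sql_py_alt
  rw [pvClean_foldl _ []]
  have := pvMain (PySem.Chars.splitOn s.toList ['\n']) [] [] (by simp)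
  simp only [List.nil_append] at this ⊢
  rw [this, pvSplitOn_eq _]
  rfl
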